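-- pv_equiv track=rewrite | github.com/neburnodrog/Pyverse | pyverse/word.py | check_if_separation
-- ===== SOURCE A (Python) =====
-- import string
--
-- def check_if_separation(vowel_groups_longer_than_3: string):
--     result = ''
--
--     for vowel in vowel_groups_longer_than_3:
--         if vowel == 'h':
--             result += '-h'
--         else:
--             result += vowel
--
--     return result
-- ===== SOURCE B (Python) =====
-- import string
--
-- def check_if_separation(vowel_groups_longer_than_3: string):
--     return '-h'.join(vowel_groups_longer_than_3.split('h'))
-- ===== Notes on version B (the rewrite author's own statement) =====
-- stated objective: idiomatic
-- what changed: Replaces the char-by-char string-accumulation loop with a partition of the string at the marker character followed by a single join of the segments.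
import Mathlib
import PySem

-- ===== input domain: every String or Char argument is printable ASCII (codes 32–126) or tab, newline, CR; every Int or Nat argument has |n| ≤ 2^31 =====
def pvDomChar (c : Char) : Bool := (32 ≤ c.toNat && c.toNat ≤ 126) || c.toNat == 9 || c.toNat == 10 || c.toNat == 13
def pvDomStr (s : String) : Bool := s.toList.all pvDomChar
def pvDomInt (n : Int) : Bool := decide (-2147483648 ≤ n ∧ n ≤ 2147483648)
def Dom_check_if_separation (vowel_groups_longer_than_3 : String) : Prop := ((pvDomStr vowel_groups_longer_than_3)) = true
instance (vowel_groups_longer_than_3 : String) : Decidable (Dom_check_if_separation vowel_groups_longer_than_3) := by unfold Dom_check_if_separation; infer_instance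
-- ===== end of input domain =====

-- B replaces A's char-by-char accumulation loop with split-on-'h' then '-h'.join (idiomatic decomposition).

-- ===== PORT A =====
-- result = ''; for vowel in s: result += '-h' if vowel=='h' else vowel
def check_if_separation (vowel_groups_longer_than_3 : String) : String :=
  String.ofList
    (vowel_groups_longer_than_3.toList.foldl
      (fun result vowel => if vowel == 'h' then result ++ ['-', 'h'] else result ++ [vowel]) [])

-- ===== PORT B =====
-- return '-h'.join(s.split('h'))
def check_if_separation_alt (vowel_groups_longer_than_3 : String) : String :=
  PySem.Str.join "-h" ((PySem.Chars.splitOn vowel_groups_longer_than_3.toList ['h']).map String.ofList)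

-- ===== PRECONDITION & SPEC =====
def Spec_check_if_separation (vowel_groups_longer_than_3 : String) (out : String) : Prop := out = check_if_separation_alt vowel_groups_longer_than_3
instance (vowel_groups_longer_than_3 : String) (out : String) : Decidable (Spec_check_if_separation vowel_groups_longer_than_3 out) := by unfold Spec_check_if_separation; infer_instance

-- ===== CLAIM (what is proved, stated in full; the proofs are below) =====
def Claim_equal_check_if_separation : Prop := ∀ (vowel_groups_longer_than_3 : String), Dom_check_if_separation vowel_groups_longer_than_3 → Spec_check_if_separation vowel_groups_longer_than_3 (check_if_separation vowel_groups_longer_than_3)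

-- ===== LEMMAS AND PROOFS =====

-- simple structural split on 'h' (proof-only reference function)
def pvSplit1 : List Char → List (List Char)
  | [] => [[]]
  | c :: rest =>
    if c = 'h' then [] :: pvSplit1 rest
    else match pvSplit1 rest with
      | [] => [[c]]
      | x :: xs => (c :: x) :: xs

theorem pvSplit1_ne_nil (l : List Char) : pvSplit1 l ≠ [] := by
  induction l with
  | nil => simp [pvSplit1]
  | cons c rest ih =>
    simp only [pvSplit1]
    split_ifs
    · simp
    · cases h : pvSplit1 rest <;> simp

-- characterisation of PySem.Chars.splitOn.go with sep = ['h']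
theorem pvGo_eq (fuel : Nat) (l cur : List Char) (acc : List (List Char))
    (hf : l.length < fuel) :
    PySem.Chars.splitOn.go ['h'] fuel l cur acc =
      acc.reverse ++ (match pvSplit1 l with
        | [] => []
        | x :: xs => (cur.reverse ++ x) :: xs) := by
  induction fuel generalizing l cur acc with
  | zero => omega
  | succ fuel ih =>
    cases l with
    | nil =>
      simp [PySem.Chars.splitOn.go, pvSplit1]
    | cons c rest =>
      simp only [PySem.Chars.splitOn.go]
      by_cases hc : c = 'h'
      · subst hc
        rw [if_pos (by simp [List.isPrefixOf])]
        rw [ih _ _ _ (by simpa using Nat.lt_of_succ_lt_succ hf)]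
        cases h : pvSplit1 rest with
        | nil => exact absurd h (pvSplit1_ne_nil rest)
        | cons x xs => simp [pvSplit1, h]
      · rw [if_neg (by simp [List.isPrefixOf]; exact fun h => hc h.symm)]
        rw [ih _ _ _ (by simpa using Nat.lt_of_succ_lt_succ hf)]
        cases h : pvSplit1 rest with
        | nil => exact absurd h (pvSplit1_ne_nil rest)
        | cons x xs => simp [pvSplit1, hc, h]

theorem pvSplitOn_eq (l : List Char) :
    PySem.Chars.splitOn l ['h'] = pvSplit1 l := by
  unfold PySem.Chars.splitOn
  rw [pvGo_eq _ _ _ _ (by omega)]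
  cases h : pvSplit1 l with
  | nil => exact absurd h (pvSplit1_ne_nil l)
  | cons x xs => simp

-- A's fold equals prefix ++ intercalate of the simple split
theorem pvFold_eq (l : List Char) (r : List Char) :
    l.foldl (fun result vowel => if vowel == 'h' then result ++ ['-', 'h'] else result ++ [vowel]) r =
      r ++ List.intercalate ['-', 'h'] (pvSplit1 l) := by
  induction l generalizing r with
  | nil => simp [pvSplit1, List.intercalate]
  | cons c rest ih =>
    simp only [beq_iff_eq] at ih ⊢
    by_cases hc : c = 'h'
    · subst hc
      simp only [List.foldl_cons]
      rw [ih]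
      cases h : pvSplit1 rest with
      | nil => exact absurd h (pvSplit1_ne_nil rest)
      | cons x xs =>
        simp [pvSplit1, h, List.intercalate]
    · simp only [List.foldl_cons, if_neg hc]
      rw [ih]
      cases h : pvSplit1 rest with
      | nil => exact absurd h (pvSplit1_ne_nil rest)
      | cons x xs =>
        simp only [pvSplit1, if_neg hc, h, List.intercalate]
        cases xs <;> simp [List.intersperse]

-- ===== VERDICT (by name: the statement is the Claim_ definition above) =====
theorem check_if_separation_spec : Claim_equal_check_if_separation := by
  intro s _
  unfold Spec_check_if_separation check_if_separation check_if_separation_alt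
  rw [pvFold_eq]
  simp only [PySem.Str.join, pvSplitOn_eq, PySem.Chars.join]
  congr 1
  simp [Function.comp_def, String.toList_ofList]
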